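-- pv_equiv track=rewrite | github.com/pisterlabs/promptset | data/scraping-2.0/repos/WillyHC22~InstructTODS/src~DST~dst_utils.py | _get_domains_from_log
-- ===== SOURCE A (Python) =====
-- def _get_domains_from_log(dialogue_log):
--     domains = []
--     all_domains = ["restaurant", "taxi", "hotel", "train", "attraction"]
--     for log in dialogue_log:
--         for domain_act in log["dialog_act"]:
--             domain = domain_act.split("-")[0].lower()
--             if domain in all_domains and domain not in domains:
--                 domains.append(domain)
--     return domains
-- ===== SOURCE B (Python) =====
-- def _get_domains_from_log(dialogue_log):
--     # flatten all lowercased prefixes once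
--     cands = [da.split("-")[0].lower() for log in dialogue_log for da in log["dialog_act"]]
--     # for each known domain find its FIRST occurrence position, then order by position
--     known = ["restaurant", "taxi", "hotel", "train", "attraction"]
--     pos = sorted(((cands.index(d), d) for d in known if d in cands), key=lambda t: t[0])
--     return [d for _, d in pos]
-- ===== Notes on version B (the rewrite author's own statement) =====
-- stated objective: alternative
-- what changed: Instead of A's online accumulator with two membership guards, B flattens the lowercased prefixes once, then for each of the five known domains finds its first-occurrence index with list.index and sorts the (index, domain) pairs by index - a sort-by-first-position algorithm rather than an order-preserving dedup scan.
import Mathlib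
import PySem

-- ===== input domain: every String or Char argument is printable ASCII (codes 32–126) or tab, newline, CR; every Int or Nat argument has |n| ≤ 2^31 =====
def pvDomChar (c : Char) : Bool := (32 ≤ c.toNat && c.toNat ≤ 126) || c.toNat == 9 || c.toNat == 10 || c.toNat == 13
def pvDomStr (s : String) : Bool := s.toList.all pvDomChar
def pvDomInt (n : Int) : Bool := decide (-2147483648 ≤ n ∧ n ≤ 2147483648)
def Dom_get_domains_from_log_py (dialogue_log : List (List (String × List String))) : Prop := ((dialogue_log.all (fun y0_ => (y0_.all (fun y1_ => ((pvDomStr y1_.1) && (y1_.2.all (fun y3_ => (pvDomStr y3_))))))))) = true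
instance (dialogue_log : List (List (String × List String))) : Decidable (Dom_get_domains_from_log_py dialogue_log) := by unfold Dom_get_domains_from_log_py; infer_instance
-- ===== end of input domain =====

-- B replaces A's online dedup-accumulator scan by a different algorithm: find each known domain's first-occurrence index in the flattened prefix list and sort the five (index, domain) pairs by index; same output.


-- ===== PORT A =====
def get_domains_from_log_py (dialogue_log : List (List (String × List String))) : List String :=
  let all_domains := ["restaurant", "taxi", "hotel", "train", "attraction"]
  dialogue_log.foldl (fun domains log =>
    (((PySem.Dict.mk log).get? "dialog_act").getD []).foldl (fun domains domain_act =>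
      let domain := PySem.Str.lower (((PySem.Str.split? domain_act "-").getD []).headD "")
      if domain ∈ all_domains ∧ domain ∉ domains then domains ++ [domain] else domains)
      domains) []

-- ===== PORT B =====
def get_domains_from_log_py_alt (dialogue_log : List (List (String × List String))) : List String :=
  let cands := dialogue_log.flatMap (fun log =>
    (((PySem.Dict.mk log).get? "dialog_act").getD []).map
      (fun da => PySem.Str.lower (((PySem.Str.split? da "-").getD []).headD "")))
  let known := ["restaurant", "taxi", "hotel", "train", "attraction"]
  -- cands.index(d): guarded by 'd in cands', so index? is some; getD 0 is exact here
  let pos := (known.filter (fun d => decide (d ∈ cands))).map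
    (fun d => ((PySem.List.index? cands d).getD 0, d))
  (PySem.List.sorted pos (fun t => t.1) false).map (fun t => t.2)

-- ===== PRECONDITION & SPEC =====
-- Pre_ excludes exactly the inputs on which Python A raises KeyError: a log dict with no "dialog_act" key.
def Pre_get_domains_from_log_py (dialogue_log : List (List (String × List String))) : Prop :=
  ∀ log ∈ dialogue_log, ((PySem.Dict.mk log).get? "dialog_act").isSome = true
instance (dialogue_log : List (List (String × List String))) : Decidable (Pre_get_domains_from_log_py dialogue_log) := by unfold Pre_get_domains_from_log_py; infer_instance

def pvWitness_get_domains_from_log_py : (List (List (String × List String))) :=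
  [[("dialog_act", ["Restaurant-Inform", "Taxi-Request", "Police-Inform"])],
   [("dialog_act", ["restaurant-bye"])]]

def Spec_get_domains_from_log_py (dialogue_log : List (List (String × List String))) (out : List String) : Prop := out = get_domains_from_log_py_alt dialogue_log
instance (dialogue_log : List (List (String × List String))) (out : List String) : Decidable (Spec_get_domains_from_log_py dialogue_log out) := by unfold Spec_get_domains_from_log_py; infer_instance

-- ===== CLAIM (what is proved, stated in full; the proofs are below) =====
def Claim_equal_get_domains_from_log_py : Prop := ∀ (dialogue_log : List (List (String × List String))), Dom_get_domains_from_log_py dialogue_log → Pre_get_domains_from_log_py dialogue_log → Spec_get_domains_from_log_py dialogue_log (get_domains_from_log_py dialogue_log)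

-- ===== LEMMAS AND PROOFS =====

-- a foldl over a flatMap is the nested foldl
theorem pv_foldl_flatMap {α β γ : Type} (l : List α) (g : α → List β) (f : γ → β → γ) (init : γ) :
    (l.flatMap g).foldl f init = l.foldl (fun acc x => (g x).foldl f acc) init := by
  induction l generalizing init with
  | nil => rfl
  | cons a t ih => simp [List.flatMap_cons, List.foldl_append, ih]

-- the fused guard 'd ∈ K ∧ d ∉ ds' is: filter by K first, then first-occurrence dedup step
theorem pv_guard_eq_filter (K : List String) :
    ∀ (cs : List String) (acc : List String),
      cs.foldl (fun ds d => if d ∈ K ∧ d ∉ ds then ds ++ [d] else ds) acc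
      = (cs.filter (fun d => decide (d ∈ K))).foldl
          (fun ds d => if d ∈ ds then ds else ds ++ [d]) acc := by
  intro cs
  induction cs with
  | nil => intro acc; rfl
  | cons c t ih =>
    intro acc
    by_cases hK : c ∈ K
    · by_cases hm : c ∈ acc <;> simp [hK, hm, ih]
    · simp [hK, ih]

-- PySem's dedup is exactly the first-occurrence dedup fold
theorem pv_dedup_eq_fold (cs : List String) :
    PySem.List.dedup cs = cs.foldl (fun ds d => if d ∈ ds then ds else ds ++ [d]) [] := by
  rw [PySem.List.dedup_eq_ofList, PySem.Set.ofList_eq_foldl]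
  apply PySem.List.foldl_congr_mem
  intro acc x _
  by_cases hm : x ∈ acc <;> simp [PySem.Set.add, PySem.Set.contains, hm]

-- first-occurrence dedup commutes with filter
theorem pv_dedup_filter (p : String → Bool) :
    ∀ (cs : List String) (acc : List String),
      (cs.filter p).foldl (fun ds d => if d ∈ ds then ds else ds ++ [d]) (acc.filter p)
      = (cs.foldl (fun ds d => if d ∈ ds then ds else ds ++ [d]) acc).filter p := by
  intro cs
  induction cs with
  | nil => intro acc; rfl
  | cons c t ih =>
    intro acc
    by_cases hm : c ∈ acc
    · have hstep : (if c ∈ acc then acc else acc ++ [c]) = acc := if_pos hm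
      by_cases hp : p c = true
      · have hmf : c ∈ acc.filter p := List.mem_filter.mpr ⟨hm, hp⟩
        simp only [List.foldl_cons, List.filter_cons, hp, if_true, hstep, if_pos hmf]
        exact ih acc
      · have hp' : p c = false := by simpa using hp
        simp only [List.foldl_cons, List.filter_cons, hp', hstep]
        exact ih acc
    · have hstep : (if c ∈ acc then acc else acc ++ [c]) = acc ++ [c] := if_neg hm
      by_cases hp : p c = true
      · have hmf : c ∉ acc.filter p := fun h => hm (List.mem_filter.mp h).1
        have hfa : (acc ++ [c]).filter p = acc.filter p ++ [c] := by
          simp [List.filter_append, hp]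
        simp only [List.foldl_cons, List.filter_cons, hp, if_true, hstep, if_neg hmf]
        rw [← hfa]; exact ih (acc ++ [c])
      · have hp' : p c = false := by simpa using hp
        have hfa : (acc ++ [c]).filter p = acc.filter p := by
          simp [List.filter_append, hp']
        simp only [List.foldl_cons, List.filter_cons, hp', hstep]
        rw [← hfa]; exact ih (acc ++ [c])

-- idxOf? on a member, as a total value
theorem pv_idxOf?_eq (cs : List String) (d : String) :
    List.idxOf? d cs = if d ∈ cs then some (cs.idxOf d) else none := by
  induction cs with
  | nil => simp
  | cons c t ih =>
    by_cases h : c = d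
    · simp [List.idxOf?_cons, h]
    · have h' : d ≠ c := fun e => h e.symm
      by_cases hm : d ∈ t <;> simp [List.idxOf?_cons, h, h', hm, ih]

-- invariant of the dedup fold: the accumulator stays ordered by first occurrence in cands
theorem pv_fold_pairwise (cands : List String) :
    ∀ (suf pre acc : List String), cands = pre ++ suf →
      acc.Pairwise (fun a b => cands.idxOf a < cands.idxOf b) →
      (∀ a, a ∈ acc ↔ a ∈ pre) →
      (suf.foldl (fun ds d => if d ∈ ds then ds else ds ++ [d]) acc).Pairwise
        (fun a b => cands.idxOf a < cands.idxOf b) := by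
  intro suf
  induction suf with
  | nil => intro pre acc _ hp _; simpa using hp
  | cons c t ih =>
    intro pre acc hsplit hp hmem
    simp only [List.foldl_cons]
    by_cases hc : c ∈ acc
    · rw [if_pos hc]
      refine ih (pre ++ [c]) acc (by simp [hsplit]) hp ?_
      intro a
      constructor
      · intro ha; exact List.mem_append_left _ ((hmem a).mp ha)
      · intro ha
        rcases List.mem_append.mp ha with h | h
        · exact (hmem a).mpr h
        · simp at h; subst h; exact hc
    · rw [if_neg hc]
      have hcpre : c ∉ pre := fun h => hc ((hmem c).mpr h)
      have hidxc : cands.idxOf c = pre.length := by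
        rw [hsplit, List.idxOf_append_of_notMem hcpre, List.idxOf_cons_self]
        omega
      have hstep : (acc ++ [c]).Pairwise (fun a b => cands.idxOf a < cands.idxOf b) := by
        rw [List.pairwise_append]
        refine ⟨hp, by simp, ?_⟩
        intro a ha b hb
        simp at hb; subst hb
        have hapre : a ∈ pre := (hmem a).mp ha
        have : cands.idxOf a = pre.idxOf a := by
          rw [hsplit, List.idxOf_append_of_mem hapre]
        rw [this, hidxc]
        exact List.idxOf_lt_length_of_mem hapre
      refine ih (pre ++ [c]) (acc ++ [c]) (by simp [hsplit]) hstep ?_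
      intro a
      simp only [List.mem_append, List.mem_singleton]
      exact or_congr (hmem a) Iff.rfl

theorem pv_dedup_pairwise_idxOf (cands : List String) :
    (PySem.List.dedup cands).Pairwise (fun a b => cands.idxOf a < cands.idxOf b) := by
  rw [pv_dedup_eq_fold]
  exact pv_fold_pairwise cands cands [] [] rfl (by simp) (by simp)

-- ===== VERDICT (by name: the statement is the Claim_ definition above) =====
theorem get_domains_from_log_py_spec : Claim_equal_get_domains_from_log_py := by
  intro dl _ _
  unfold Spec_get_domains_from_log_py get_domains_from_log_py get_domains_from_log_py_alt
  set K : List String := ["restaurant", "taxi", "hotel", "train", "attraction"] with hK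
  set cand : String → String := fun da => PySem.Str.lower (((PySem.Str.split? da "-").getD []).headD "") with hcand
  set acts : List (String × List String) → List String :=
    fun log => ((PySem.Dict.mk log).get? "dialog_act").getD [] with hacts
  set cands : List String := dl.flatMap (fun log => (acts log).map cand) with hcands
  -- A's fused loop computes the first-occurrence-ordered dedup of cands, filtered by K
  have hA : dl.foldl (fun domains log => (acts log).foldl (fun domains domain_act =>
        if cand domain_act ∈ K ∧ cand domain_act ∉ domains
        then domains ++ [cand domain_act] else domains) domains) []
      = (PySem.List.dedup cands).filter (fun d => decide (d ∈ K)) := by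
    calc dl.foldl (fun domains log => (acts log).foldl (fun domains domain_act =>
            if cand domain_act ∈ K ∧ cand domain_act ∉ domains
            then domains ++ [cand domain_act] else domains) domains) []
        = (dl.flatMap acts).foldl (fun domains domain_act =>
            if cand domain_act ∈ K ∧ cand domain_act ∉ domains
            then domains ++ [cand domain_act] else domains) [] := by rw [pv_foldl_flatMap]
      _ = ((dl.flatMap acts).map cand).foldl (fun ds d =>
            if d ∈ K ∧ d ∉ ds then ds ++ [d] else ds) [] := by rw [List.foldl_map]
      _ = cands.foldl (fun ds d => if d ∈ K ∧ d ∉ ds then ds ++ [d] else ds) [] := by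
            rw [hcands, List.map_flatMap]
      _ = (cands.filter (fun d => decide (d ∈ K))).foldl
            (fun ds d => if d ∈ ds then ds else ds ++ [d]) [] := by rw [pv_guard_eq_filter]
      _ = (PySem.List.dedup cands).filter (fun d => decide (d ∈ K)) := by
            rw [pv_dedup_eq_fold]
            simpa using pv_dedup_filter (fun d => decide (d ∈ K)) cands []
  rw [hA]
  -- now the B side: sorting the five (first-index, domain) pairs by index yields the same list
  set f : String → Nat × String := fun d => (cands.idxOf d, d) with hf
  set L1 : List String := K.filter (fun d => decide (d ∈ cands)) with hL1
  set L2 : List String := (PySem.List.dedup cands).filter (fun d => decide (d ∈ K)) with hL2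
  -- B's pair list is L1.map f (index? getD 0 = idxOf on members)
  have hpos : (K.filter (fun d => decide (d ∈ cands))).map
      (fun d => ((PySem.List.index? cands d).getD 0, d)) = L1.map f := by
    apply List.map_congr_left
    intro d hd
    have hdc : d ∈ cands := by
      have := (List.mem_filter.mp hd).2; simpa using this
    rw [PySem.List.index?_eq_idxOf?, pv_idxOf?_eq, if_pos hdc]
    simp [hf]
  show L2 = (PySem.List.sorted ((K.filter (fun d => decide (d ∈ cands))).map
      (fun d => ((PySem.List.index? cands d).getD 0, d))) (fun t => t.1) false).map (fun t => t.2)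
  rw [hpos]
  -- L2 is a permutation of L1 …
  have hKnd : K.Nodup := by decide
  have hperm : L2.Perm L1 := by
    apply (List.perm_ext_iff_of_nodup (List.Nodup.filter _ (PySem.List.nodup_dedup cands))
      (List.Nodup.filter _ hKnd)).mpr
    intro a
    simp only [List.mem_filter, PySem.List.mem_dedup, decide_eq_true_eq]
    exact ⟨fun ⟨h1, h2⟩ => ⟨h2, h1⟩, fun ⟨h1, h2⟩ => ⟨h2, h1⟩⟩
  -- … that is strictly increasing in the first-occurrence index
  have hpw : (L2.map f).Pairwise (fun a b => a.1 < b.1) := by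
    rw [List.pairwise_map]
    exact List.Pairwise.filter _ (pv_dedup_pairwise_idxOf cands)
  have hsorted : PySem.List.sorted (L1.map f) (fun t => t.1) false = L2.map f :=
    PySem.List.sorted_eq_of_perm_of_pairwise_lt (L1.map f) (L2.map f) (fun t => t.1) ((hperm).map f) hpw
  rw [hsorted, List.map_map]
  have : ((fun t : Nat × String => t.2) ∘ f) = id := by funext d; simp [hf]
  rw [this, List.map_id]
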